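-- pv_equiv track=rewrite | github.com/emilianstoyanov/Python-Tasks | check_for_infinite_loop.py | solution
-- ===== SOURCE A (Python) =====
-- def solution(a, b):
--     if a > b:
--         return True
--
--     while a < b:
--         a += 1
--         b -= 1
--
--         if a > b:
--             return True
--
--     return False
-- ===== SOURCE B (Python) =====
-- def solution(a, b):
--     return a > b or (b - a) % 2 == 1
-- ===== Notes on version B (the rewrite author's own statement) =====
-- stated objective: faster
-- what changed: Replaced the converging increment/decrement loop by a closed-form parity check: True iff a > b or the gap b - a is odd.
import Mathlib
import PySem

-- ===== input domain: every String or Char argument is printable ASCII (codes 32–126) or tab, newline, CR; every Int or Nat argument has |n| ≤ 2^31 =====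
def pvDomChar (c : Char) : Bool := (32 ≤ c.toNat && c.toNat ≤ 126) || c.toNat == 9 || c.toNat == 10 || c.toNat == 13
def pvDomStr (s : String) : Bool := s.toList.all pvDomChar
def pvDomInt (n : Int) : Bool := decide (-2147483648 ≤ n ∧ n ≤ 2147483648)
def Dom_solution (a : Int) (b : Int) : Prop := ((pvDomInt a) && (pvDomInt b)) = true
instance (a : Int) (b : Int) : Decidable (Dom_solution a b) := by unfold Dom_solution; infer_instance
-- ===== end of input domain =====

-- B replaces A's converging increment/decrement loop by a closed-form parity check (objective: faster).

-- ===== PORT A =====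
-- the while loop: a += 1; b -= 1; if a > b: return True; decreasing measure (b - a).toNat
def solutionLoop (a : Int) (b : Int) : Bool :=
  if a < b then
    let a' := a + 1
    let b' := b - 1
    if a' > b' then true else solutionLoop a' b'
  else false
termination_by (b - a).toNat
decreasing_by omega

def solution (a : Int) (b : Int) : Bool :=
  if a > b then true else solutionLoop a b

-- ===== PORT B =====
def solution_alt (a : Int) (b : Int) : Bool :=
  decide (a > b) || decide ((b - a) % 2 == 1)

-- ===== PRECONDITION & SPEC =====
def Spec_solution (a : Int) (b : Int) (out : Bool) : Prop := out = solution_alt a b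
instance (a : Int) (b : Int) (out : Bool) : Decidable (Spec_solution a b out) := by unfold Spec_solution; infer_instance

-- ===== CLAIM (what is proved, stated in full; the proofs are below) =====
def Claim_equal_solution : Prop := ∀ (a : Int) (b : Int), Dom_solution a b → Spec_solution a b (solution a b)

-- ===== LEMMAS AND PROOFS =====
theorem solutionLoop_parity (a b : Int) (h : a ≤ b) :
    solutionLoop a b = decide ((b - a) % 2 = 1) := by
  generalize hn : (b - a).toNat = n
  induction n using Nat.strong_induction_on generalizing a b with
  | _ n ih =>
    unfold solutionLoop
    by_cases hab : a < b
    · simp only [hab, if_true]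
      by_cases h1 : a + 1 > b - 1
      · simp only [h1, if_true]
        have : b - a = 1 := by omega
        simp [this]
      · simp only [h1, if_false]
        have hle : a + 1 ≤ b - 1 := by omega
        have := ih ((b - 1 - (a + 1)).toNat) (by omega) (a+1) (b-1) hle rfl
        rw [this]
        have : (b - 1 - (a + 1)) % 2 = (b - a) % 2 := by omega
        rw [this]
    · simp only [hab, if_false]
      have : b - a = 0 := by omega
      simp [this]

-- ===== VERDICT (by name: the statement is the Claim_ definition above) =====
theorem solution_spec : Claim_equal_solution := by
  intro a b _
  unfold Spec_solution solution solution_alt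
  by_cases hab : a > b
  · simp [hab]
  · have h : a ≤ b := by omega
    rw [if_neg hab, solutionLoop_parity a b h]
    simp [hab]
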